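-- pv_equiv track=rewrite | github.com/wyk18703232953/myResearch | codeComplex/data/filteredData/python/logn/python_logn_0088.py | str_sub
-- ===== SOURCE A (Python) =====
-- def str_sub(n):
--     n = list(n)
--     for i in range(1, len(n) + 1):
--         if n[-i] == '0':
--             n[-i] = '9'
--         else:
--             n[-i] = int(int(n[-i]) - 1)
--             break
--     n = str(n)
--     return n
-- ===== SOURCE B (Python) =====
-- def str_sub(n):
--     stripped = n.rstrip('0')
--     k = len(n) - len(stripped)
--     if k == len(n):
--         out = ['9'] * len(n)
--     else:
--         p = len(n) - k - 1
--         out = list(n[:p]) + [int(n[p]) - 1] + ['9'] * k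
--     return str(out)
-- ===== Notes on version B (the rewrite author's own statement) =====
-- stated objective: alternative
-- what changed: replaces the right-to-left in-place borrow loop with an up-front trailing-zero count (rstrip) and a direct assembly of untouched-prefix + decremented boundary digit + nines.
import Mathlib
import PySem

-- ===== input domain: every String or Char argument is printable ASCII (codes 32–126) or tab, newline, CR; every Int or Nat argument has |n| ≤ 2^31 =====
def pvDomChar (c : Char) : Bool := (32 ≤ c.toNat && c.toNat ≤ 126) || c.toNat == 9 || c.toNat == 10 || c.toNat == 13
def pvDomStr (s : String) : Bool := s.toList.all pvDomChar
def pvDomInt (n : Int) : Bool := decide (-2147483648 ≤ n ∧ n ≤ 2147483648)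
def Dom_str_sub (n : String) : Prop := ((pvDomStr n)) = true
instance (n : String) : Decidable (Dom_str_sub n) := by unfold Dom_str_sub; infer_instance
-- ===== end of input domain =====

-- B replaces A's right-to-left borrow loop by counting trailing zeros up front and
-- assembling prefix + decremented boundary digit + nines directly (same cost, different decomposition).

-- Shared rendering of Python's str(list) on a list mixing single chars and ints
-- (exact for the ASCII domain: single quotes, "'" rendered with double quotes, \\ \t \n \r escaped).
def pyCharRepr (c : Char) : String :=
  if c = '\'' then "\"'\""
  else if c = '\\' then "'\\\\'"
  else if c = '\t' then "'\\t'"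
  else if c = '\n' then "'\\n'"
  else if c = '\x0d' then "'\\r'"
  else "'" ++ String.ofList [c] ++ "'"

def pyItemRepr : Char ⊕ Int → String
  | Sum.inl c => pyCharRepr c
  | Sum.inr i => PySem.Int.toStr i

def pyListRepr (xs : List (Char ⊕ Int)) : String :=
  "[" ++ String.intercalate ", " (xs.map pyItemRepr) ++ "]"

-- ===== PORT A =====
-- A's loop i = 1 .. len walks the list from the right (n[-i]); transliterated as a
-- recursion over the reversed char list: '0' becomes the char '9', the first other
-- char becomes the int int(c)-1 and the loop breaks (the rest is copied untouched).
def strSubLoop : List Char → List (Char ⊕ Int)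
  | [] => []
  | c :: rest =>
      if c = '0' then Sum.inl '9' :: strSubLoop rest
      else Sum.inr (((c.toNat : Int) - 48) - 1) :: rest.map Sum.inl

def str_sub (n : String) : String :=
  pyListRepr ((strSubLoop n.toList.reverse).reverse)

-- ===== PORT B =====
-- Source B: stripped = n.rstrip('0'); k trailing zeros; all-zero branch, else prefix + int(n[p])-1 + nines.
def str_sub_alt (n : String) : String :=
  let cs := n.toList
  let stripped := (cs.reverse.dropWhile (fun c => c = '0')).reverse  -- n.rstrip('0')
  let k := cs.length - stripped.length
  if k = cs.length then
    pyListRepr (List.replicate cs.length (Sum.inl '9'))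
  else
    let p := cs.length - k - 1
    pyListRepr ((cs.take p).map Sum.inl
      ++ [Sum.inr ((((cs.getD p ' ').toNat : Int) - 48) - 1)]
      ++ List.replicate k (Sum.inl '9'))

-- ===== PRECONDITION & SPEC =====
-- Pre_ excludes exactly the inputs on which A raises ValueError: the first non-zero-digit
-- character from the right is not a decimal digit 1..9 (B raises there too).
def Pre_str_sub (n : String) : Prop :=
  ((n.toList.reverse.dropWhile (fun c => c = '0')).head?.all
    (fun c => decide ('1' ≤ c ∧ c ≤ '9'))) = true
instance (n : String) : Decidable (Pre_str_sub n) := by unfold Pre_str_sub; infer_instance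
def pvWitness_str_sub : String := "120"

def Spec_str_sub (n : String) (out : String) : Prop := out = str_sub_alt n
instance (n : String) (out : String) : Decidable (Spec_str_sub n out) := by unfold Spec_str_sub; infer_instance

-- ===== CLAIM (what is proved, stated in full; the proofs are below) =====
def Claim_equal_str_sub : Prop := ∀ (n : String), Dom_str_sub n → Pre_str_sub n → Spec_str_sub n (str_sub n)

-- ===== LEMMAS AND PROOFS =====

-- A's loop result, characterised by the takeWhile/dropWhile split of the reversed list.
lemma strSubLoop_eq (r : List Char) :
    strSubLoop r = (r.takeWhile (fun c => c = '0')).map (fun _ => Sum.inl '9') ++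
      (match r.dropWhile (fun c => c = '0') with
       | [] => ([] : List (Char ⊕ Int))
       | c :: rest => Sum.inr (((c.toNat : Int) - 48) - 1) :: rest.map Sum.inl) := by
  induction r with
  | nil => rfl
  | cons c rest ih =>
      by_cases h : c = '0' <;>
        simp [strSubLoop, h, ih]

lemma str_sub_eq_alt (n : String) : str_sub n = str_sub_alt n := by
  simp only [str_sub, str_sub_alt]
  have hsplit : (n.toList.reverse.takeWhile (fun c => c = '0')) ++
      (n.toList.reverse.dropWhile (fun c => c = '0')) = n.toList.reverse :=
    List.takeWhile_append_dropWhile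
  rcases hd : n.toList.reverse.dropWhile (fun c => c = '0') with _ | ⟨c, rest⟩
  · -- all characters are '0' (or the string is empty)
    have htake : n.toList.reverse.takeWhile (fun c => c = '0') = n.toList.reverse := by
      rw [hd] at hsplit; simpa using hsplit
    simp [strSubLoop_eq, hd, htake, List.map_const', List.reverse_replicate]
  · -- reversed list = zeros ++ c :: rest, with t the zeros
    set t := n.toList.reverse.takeWhile (fun c => c = '0') with ht
    have hcsdec : n.toList = rest.reverse ++ c :: t.reverse := by
      have : n.toList = n.toList.reverse.reverse := by simp
      rw [this, ← hsplit, hd]; simp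
    have hlen : n.toList.length = rest.length + 1 + t.length := by
      rw [hcsdec]; simp; omega
    have hklen : n.toList.length - ((c :: rest).reverse.length) = t.length := by
      simp [hlen]
    have hne : ¬ (n.toList.length - ((c :: rest).reverse.length) = n.toList.length) := by
      simp [hlen]
    have hp : n.toList.length - (n.toList.length - ((c :: rest).reverse.length)) - 1 = rest.length := by
      simp [hlen]
    have htakep : n.toList.take rest.length = rest.reverse := by
      rw [hcsdec]
      have h2 : rest.length = rest.reverse.length := by simp
      rw [h2, List.take_left]
    have hgetp : n.toList.getD rest.length ' ' = c := by
      rw [hcsdec, List.getD_eq_getElem?_getD]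
      rw [List.getElem?_append_right (by simp)]
      simp
    rw [if_neg hne, hp, htakep, hgetp, hklen]
    simp [strSubLoop_eq, hd, ← ht, List.map_const']

-- ===== VERDICT (by name: the statement is the Claim_ definition above) =====
theorem str_sub_spec : Claim_equal_str_sub := by
  intro n _ _
  exact str_sub_eq_alt n
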